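-- pv_equiv track=rewrite | github.com/tdrmk/multi_hop_routing_algo_simulation | backend.py | generate_path_combinations
-- ===== SOURCE A (Python) =====
-- from itertools import combinations_with_replacement, combinations
--
-- def generate_path_combinations(paths, num_paths, with_replacement=True):
--     """ This function generates all possible combinations of paths with 'num_paths' paths """
--     assert len(paths) > 0
--     # assert num_paths > 0
--     if with_replacement:
--         for _paths in combinations_with_replacement(paths, num_paths):
--             yield _paths
--     else:
--         for _paths in combinations(paths, num_paths):
--             yield _paths
-- ===== SOURCE B (Python) =====
-- def generate_path_combinations(paths, num_paths, with_replacement=True):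
--     """ This function generates all possible combinations of paths with 'num_paths' paths """
--     assert len(paths) > 0
--     n = len(paths)
--     step = 0 if with_replacement else 1
--
--     def rec(start, k):
--         if k <= 0:
--             yield ()
--             return
--         for i in range(start, n):
--             for rest in rec(i + step, k - 1):
--                 yield (paths[i],) + rest
--
--     yield from rec(0, num_paths)
-- ===== Notes on version B (the rewrite author's own statement) =====
-- stated objective: alternative
-- what changed: Replaces the two itertools library calls (combinations / combinations_with_replacement) with one self-contained recursive generator over index positions, where the replacement mode only changes whether the next index starts at i or i+1.
import Mathlib
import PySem

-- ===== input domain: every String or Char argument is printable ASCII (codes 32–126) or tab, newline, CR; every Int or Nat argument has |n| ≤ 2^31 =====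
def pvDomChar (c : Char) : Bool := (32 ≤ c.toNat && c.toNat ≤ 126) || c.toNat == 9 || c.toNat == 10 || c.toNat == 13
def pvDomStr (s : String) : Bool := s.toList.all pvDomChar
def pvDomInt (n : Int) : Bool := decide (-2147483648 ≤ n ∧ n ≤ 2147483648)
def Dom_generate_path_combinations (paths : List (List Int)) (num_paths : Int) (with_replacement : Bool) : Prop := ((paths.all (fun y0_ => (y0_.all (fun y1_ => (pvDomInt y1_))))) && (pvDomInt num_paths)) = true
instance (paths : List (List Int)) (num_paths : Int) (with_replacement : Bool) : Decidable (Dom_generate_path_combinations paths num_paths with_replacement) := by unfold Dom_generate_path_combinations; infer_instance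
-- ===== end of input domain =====

-- B replaces the two itertools library calls with one self-contained recursive
-- generator over index positions (objective: alternative decomposition, same cost).
-- Both versions are generators in Python; the ports return the fully materialised list.

-- ===== PORT A =====
-- itertools.combinations(xs, k), ported as its standard recursive specification
-- (positional lexicographic order: tuples containing xs[0] first).
def pvCombA (xs : List (List Int)) (k : Nat) : List (List (List Int)) :=
  match xs, k with
  | _, 0 => [[]]
  | [], _ + 1 => []
  | x :: rest, k + 1 => (pvCombA rest k).map (x :: ·) ++ pvCombA rest (k + 1)
termination_by (k, xs.length)

-- itertools.combinations_with_replacement(xs, k), same convention.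
def pvCwrA (xs : List (List Int)) (k : Nat) : List (List (List Int)) :=
  match xs, k with
  | _, 0 => [[]]
  | [], _ + 1 => []
  | x :: rest, k + 1 => (pvCwrA (x :: rest) k).map (x :: ·) ++ pvCwrA rest (k + 1)
termination_by (k, xs.length)

def generate_path_combinations (paths : List (List Int)) (num_paths : Int) (with_replacement : Bool) : List (List (List Int)) :=
  if with_replacement then pvCwrA paths num_paths.toNat
  else pvCombA paths num_paths.toNat

-- ===== PORT B =====
-- rec(start, k) of Source B: choose a non-decreasing (step 0) / strictly increasing
-- (step 1) sequence of k indices into paths, starting at `start`.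
def pvRecB (paths : List (List Int)) (step : Nat) (start : Nat) (k : Nat) : List (List (List Int)) :=
  match k with
  | 0 => [[]]
  | k + 1 =>
    (List.range' start (paths.length - start)).flatMap fun i =>
      (pvRecB paths step (i + step) k).map (paths.getD i [] :: ·)

def generate_path_combinations_alt (paths : List (List Int)) (num_paths : Int) (with_replacement : Bool) : List (List (List Int)) :=
  pvRecB paths (if with_replacement then 0 else 1) 0 num_paths.toNat

-- ===== PRECONDITION & SPEC =====
-- Pre_ excludes exactly the inputs where Python A raises: empty `paths`
-- (AssertionError) and negative num_paths (ValueError from itertools).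
def Pre_generate_path_combinations (paths : List (List Int)) (num_paths : Int) (with_replacement : Bool) : Prop :=
  paths ≠ [] ∧ 0 ≤ num_paths
instance (paths : List (List Int)) (num_paths : Int) (with_replacement : Bool) : Decidable (Pre_generate_path_combinations paths num_paths with_replacement) := by unfold Pre_generate_path_combinations; infer_instance

def pvWitness_generate_path_combinations : List (List Int) × Int × Bool := ([[1], [2, 3]], 2, false)

def Spec_generate_path_combinations (paths : List (List Int)) (num_paths : Int) (with_replacement : Bool) (out : List (List (List Int))) : Prop := out = generate_path_combinations_alt paths num_paths with_replacement
instance (paths : List (List Int)) (num_paths : Int) (with_replacement : Bool) (out : List (List (List Int))) : Decidable (Spec_generate_path_combinations paths num_paths with_replacement out) := by unfold Spec_generate_path_combinations; infer_instance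

-- ===== CLAIM (what is proved, stated in full; the proofs are below) =====
def Claim_equal_generate_path_combinations : Prop := ∀ (paths : List (List Int)) (num_paths : Int) (with_replacement : Bool), Dom_generate_path_combinations paths num_paths with_replacement → Pre_generate_path_combinations paths num_paths with_replacement → Spec_generate_path_combinations paths num_paths with_replacement (generate_path_combinations paths num_paths with_replacement)

-- ===== LEMMAS AND PROOFS =====

lemma pvRecB_stop (paths : List (List Int)) (step start k : Nat)
    (h : paths.length ≤ start) : pvRecB paths step start (k + 1) = [] := by
  simp [pvRecB, Nat.sub_eq_zero_of_le h]

lemma pvRecB_step (paths : List (List Int)) (step start k : Nat)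
    (h : start < paths.length) :
    pvRecB paths step start (k + 1) =
      (pvRecB paths step (start + step) k).map (paths.getD start [] :: ·) ++
        pvRecB paths step (start + 1) (k + 1) := by
  have hlen : paths.length - start = (paths.length - (start + 1)) + 1 := by omega
  conv_lhs => rw [pvRecB, hlen, List.range'_succ]
  rw [List.flatMap_cons]
  rfl

lemma getD_drop (paths : List (List Int)) (start : Nat) (h : start < paths.length) :
    paths.drop start = paths.getD start [] :: paths.drop (start + 1) := by
  rw [List.getD_eq_getElem _ _ h]
  exact List.drop_eq_getElem_cons h

lemma pvRecB_comb (paths : List (List Int)) (k : Nat) :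
    ∀ start, pvRecB paths 1 start k = pvCombA (paths.drop start) k := by
  induction k with
  | zero => intro start; cases h : paths.drop start <;> simp [pvRecB, pvCombA]
  | succ k ih =>
    have H : ∀ m start, paths.length - start ≤ m →
        pvRecB paths 1 start (k + 1) = pvCombA (paths.drop start) (k + 1) := by
      intro m
      induction m with
      | zero =>
        intro start hm
        have h : paths.length ≤ start := by omega
        rw [pvRecB_stop _ _ _ _ h, List.drop_eq_nil_of_le h, pvCombA]
      | succ m ihm =>
        intro start hm
        by_cases h : start < paths.length
        · rw [pvRecB_step _ _ _ _ h, getD_drop _ _ h, pvCombA,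
            ih (start + 1), ihm (start + 1) (by omega)]
        · rw [pvRecB_stop _ _ _ _ (by omega), List.drop_eq_nil_of_le (by omega), pvCombA]
    intro start
    exact H paths.length start (by omega)

lemma pvRecB_cwr (paths : List (List Int)) (k : Nat) :
    ∀ start, pvRecB paths 0 start k = pvCwrA (paths.drop start) k := by
  induction k with
  | zero => intro start; cases h : paths.drop start <;> simp [pvRecB, pvCwrA]
  | succ k ih =>
    have H : ∀ m start, paths.length - start ≤ m →
        pvRecB paths 0 start (k + 1) = pvCwrA (paths.drop start) (k + 1) := by
      intro m
      induction m with
      | zero =>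
        intro start hm
        have h : paths.length ≤ start := by omega
        rw [pvRecB_stop _ _ _ _ h, List.drop_eq_nil_of_le h, pvCwrA]
      | succ m ihm =>
        intro start hm
        by_cases h : start < paths.length
        · rw [pvRecB_step _ _ _ _ h, getD_drop _ _ h, pvCwrA,
            ← getD_drop _ _ h]
          simp only [Nat.add_zero]
          rw [ih start, ihm (start + 1) (by omega)]
        · rw [pvRecB_stop _ _ _ _ (by omega), List.drop_eq_nil_of_le (by omega), pvCwrA]
    intro start
    exact H paths.length start (by omega)

-- ===== VERDICT (by name: the statement is the Claim_ definition above) =====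
theorem generate_path_combinations_spec : Claim_equal_generate_path_combinations := by
  intro paths num_paths with_replacement _ _
  unfold Spec_generate_path_combinations generate_path_combinations generate_path_combinations_alt
  cases with_replacement with
  | false => simpa using (pvRecB_comb paths num_paths.toNat 0).symm
  | true => simpa using (pvRecB_cwr paths num_paths.toNat 0).symm
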